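-- pv_equiv track=rewrite | github.com/NoamBracha/T3SS-components | T3SS_components_after_editing.py | get_best_bacterial_T3SS_match_dict
-- ===== SOURCE A (Python) =====
-- def get_T3SS_homologous_bacterial_genes_list(all_subsystems_dict):
--     T3SS_homologous_bacterial_genes = []
--     for subsystem_dict in all_subsystems_dict.values():
--         for bacterial_T3SS_tuple in subsystem_dict.values():
--             bacterial_gene = bacterial_T3SS_tuple[0]
--             if bacterial_gene not in T3SS_homologous_bacterial_genes:
--                 T3SS_homologous_bacterial_genes.append(bacterial_gene)
--     return T3SS_homologous_bacterial_genes
--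
-- def get_best_bacterial_T3SS_match_dict(all_subsystems_dict):
--
--     T3SS_homologous_bacterial_genes = get_T3SS_homologous_bacterial_genes_list(all_subsystems_dict)
--
--     best_bacterial_T3SS_match = {} # {bacterial_gene: (system_gene, subsystem)}
--
--     for bacterial_gene in T3SS_homologous_bacterial_genes:
--         max_bit_score = 0
--         for subsystem_name, subsystem_dict in all_subsystems_dict.items():
--             for subsystem_gene, bacterial_gene_bit_score_tup in subsystem_dict.items():
--                 if bacterial_gene in bacterial_gene_bit_score_tup:
--                     bit_score = bacterial_gene_bit_score_tup[1]
--                     if bit_score > max_bit_score: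
--                         max_bit_score = bit_score
--                         # DONE: Use more informative names ("best_system_gene")
--                         best_system_gene = subsystem_gene
--                         best_subsystem = subsystem_name
--         best_bacterial_T3SS_match[bacterial_gene] = (best_system_gene, best_subsystem)
--
--     return best_bacterial_T3SS_match
-- ===== SOURCE B (Python) =====
-- def get_best_bacterial_T3SS_match_dict(all_subsystems_dict):
--     # One pass over the input: group every hit under its bacterial gene.
--     hits_by_gene = {}  # {bacterial_gene: [(bit_score, system_gene, subsystem_name), ...]}
--     for subsystem_name, subsystem_dict in all_subsystems_dict.items():
--         for system_gene, (bacterial_gene, bit_score) in subsystem_dict.items():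
--             hits_by_gene.setdefault(bacterial_gene, []).append(
--                 (bit_score, system_gene, subsystem_name))
--
--     best_bacterial_T3SS_match = {}  # {bacterial_gene: (system_gene, subsystem)}
--     for bacterial_gene, hits in hits_by_gene.items():
--         max_bit_score = 0
--         for bit_score, system_gene, subsystem_name in hits:
--             if bit_score > max_bit_score:
--                 max_bit_score = bit_score
--                 best_system_gene = system_gene
--                 best_subsystem = subsystem_name
--         best_bacterial_T3SS_match[bacterial_gene] = (best_system_gene, best_subsystem)
--     return best_bacterial_T3SS_match
-- ===== Notes on version B (the rewrite author's own statement) =====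
-- stated objective: faster
-- what changed: A first builds a dedup gene list with a quadratic membership scan and then rescans the entire nested dict once per bacterial gene; B builds a dict grouping all hits under their bacterial gene in a single pass and scans each gene's own hit list once; Pre_ excludes the inputs on which both raise NameError (the first bacterial gene has no hit with bit_score > 0).
import Mathlib
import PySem

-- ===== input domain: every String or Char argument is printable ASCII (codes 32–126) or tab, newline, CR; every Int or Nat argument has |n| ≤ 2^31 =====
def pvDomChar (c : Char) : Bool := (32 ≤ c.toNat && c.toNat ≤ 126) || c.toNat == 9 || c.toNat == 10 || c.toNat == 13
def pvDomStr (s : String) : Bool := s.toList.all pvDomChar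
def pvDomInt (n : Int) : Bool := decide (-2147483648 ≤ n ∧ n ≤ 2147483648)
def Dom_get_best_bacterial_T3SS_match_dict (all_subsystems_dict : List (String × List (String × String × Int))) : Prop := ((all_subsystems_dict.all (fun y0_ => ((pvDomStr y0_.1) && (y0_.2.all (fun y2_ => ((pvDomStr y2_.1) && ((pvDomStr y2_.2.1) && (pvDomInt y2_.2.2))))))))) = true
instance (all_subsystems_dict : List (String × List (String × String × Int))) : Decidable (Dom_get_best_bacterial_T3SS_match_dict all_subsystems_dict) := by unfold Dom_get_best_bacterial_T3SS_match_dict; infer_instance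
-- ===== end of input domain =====

-- B groups all hits under their bacterial gene in one pass and scans each gene's own hit list,
-- instead of A's rescan of the entire nested dict once per gene; same return value on every input
-- admitted by Pre_ (Pre_ excludes exactly the inputs on which the Python raises NameError).


-- ===== PORT A =====
-- get_T3SS_homologous_bacterial_genes_list: dedup list of bacterial genes in first-appearance order
def pvA_genes (all_subsystems_dict : List (String × List (String × String × Int))) : List String :=
  all_subsystems_dict.foldl
    (fun acc p =>
      p.2.foldl
        (fun acc2 t => if acc2.contains t.2.1 then acc2 else acc2 ++ [t.2.1])
        acc)
    []

-- the inner double loop of A for one bacterial_gene g; state = (max_bit_score, best_system_gene, best_subsystem).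
-- Python's `bacterial_gene in bacterial_gene_bit_score_tup` is `g == tup[0] or g == tup[1]`; the second
-- disjunct compares a str with an int and is always False, so it is exactly `tup[0] == g`.
def pvA_scan (all_subsystems_dict : List (String × List (String × String × Int))) (g : String)
    (st : Int × String × String) : Int × String × String :=
  all_subsystems_dict.foldl
    (fun st1 p =>
      p.2.foldl
        (fun st2 t =>
          if t.2.1 = g then
            (if st2.1 < t.2.2 then (t.2.2, t.1, p.1) else st2)
          else st2)
        st1)
    st

-- best_system_gene/best_subsystem are ordinary Python variables that persist across genes; before the
-- first assignment they are unbound, modeled as ("",""): Pre_ excludes the inputs where Python reads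
-- them unbound (NameError).
def get_best_bacterial_T3SS_match_dict (all_subsystems_dict : List (String × List (String × String × Int))) : List (String × String × String) :=
  let genes := pvA_genes all_subsystems_dict
  (genes.foldl
    (fun (st : (String × String) × List (String × String × String)) g =>
      let r := pvA_scan all_subsystems_dict g (0, st.1)
      (r.2, st.2 ++ [(g, r.2)]))
    (("", ""), [])).2

-- ===== PORT B =====
-- hits_by_gene.setdefault(g, []).append(x) stores hits_by_gene.get(g, []) + [x] at g, keeping the
-- key's position — exactly Dict.modify g [] (· ++ [x])
def pvB_group (all_subsystems_dict : List (String × List (String × String × Int))) :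
    PySem.Dict String (List (Int × String × String)) :=
  all_subsystems_dict.foldl
    (fun acc p =>
      p.2.foldl
        (fun acc2 t => acc2.modify t.2.1 [] (· ++ [(t.2.2, t.1, p.1)]))
        acc)
    PySem.Dict.empty

-- B's second loop: per grouped gene, the scan over its own hit list; max_bit_score restarts at 0,
-- best_system_gene/best_subsystem persist across genes exactly like A's (unbound before the first
-- assignment → ("",""), outside Pre_)
def get_best_bacterial_T3SS_match_dict_alt (all_subsystems_dict : List (String × List (String × String × Int))) : List (String × String × String) :=
  ((pvB_group all_subsystems_dict).items.foldl
    (fun (st : (String × String) × List (String × String × String)) kv =>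
      let r := kv.2.foldl
        (fun (s : Int × String × String) t => if s.1 < t.1 then (t.1, t.2.1, t.2.2) else s)
        (0, st.1)
      (r.2, st.2 ++ [(kv.1, r.2)]))
    (("", ""), [])).2

-- ===== PRECONDITION & SPEC =====
-- all (subsystem, system_gene, bacterial_gene, bit_score) records, flattened in iteration order
def pvEntries (all_subsystems_dict : List (String × List (String × String × Int))) :
    List (String × String × String × Int) :=
  all_subsystems_dict.flatMap (fun p => p.2.map (fun t => (p.1, t)))

-- Pre_ excludes exactly the inputs on which the Python (A, and B alike) raises NameError: a nonempty
-- input whose FIRST bacterial gene has no hit with bit_score > 0 (best_system_gene is read unbound).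
def Pre_get_best_bacterial_T3SS_match_dict (all_subsystems_dict : List (String × List (String × String × Int))) : Prop :=
  ((pvEntries all_subsystems_dict).head?.map (·.2.2.1)) = none ∨
  ∃ e ∈ pvEntries all_subsystems_dict,
    some e.2.2.1 = ((pvEntries all_subsystems_dict).head?.map (·.2.2.1)) ∧ 0 < e.2.2.2
instance (all_subsystems_dict : List (String × List (String × String × Int))) : Decidable (Pre_get_best_bacterial_T3SS_match_dict all_subsystems_dict) := by unfold Pre_get_best_bacterial_T3SS_match_dict; infer_instance

def pvWitness_get_best_bacterial_T3SS_match_dict : (List (String × List (String × String × Int))) :=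
  [("SctN", [("sctN", ("fliI", 42)), ("sctJ", ("fliF", 17))]), ("SctV", [("sctV", ("flhA", 3))])]

def Spec_get_best_bacterial_T3SS_match_dict (all_subsystems_dict : List (String × List (String × String × Int))) (out : List (String × String × String)) : Prop := out = get_best_bacterial_T3SS_match_dict_alt all_subsystems_dict
instance (all_subsystems_dict : List (String × List (String × String × Int))) (out : List (String × String × String)) : Decidable (Spec_get_best_bacterial_T3SS_match_dict all_subsystems_dict out) := by unfold Spec_get_best_bacterial_T3SS_match_dict; infer_instance

-- ===== CLAIM (what is proved, stated in full; the proofs are below) =====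
def Claim_equal_get_best_bacterial_T3SS_match_dict : Prop := ∀ (all_subsystems_dict : List (String × List (String × String × Int))), Dom_get_best_bacterial_T3SS_match_dict all_subsystems_dict → Pre_get_best_bacterial_T3SS_match_dict all_subsystems_dict → Spec_get_best_bacterial_T3SS_match_dict all_subsystems_dict (get_best_bacterial_T3SS_match_dict all_subsystems_dict)

-- ===== LEMMAS AND PROOFS =====

-- A's inner scan as a step over one flattened entry
def pvStepA (g : String) (st : Int × String × String) (e : String × String × String × Int) :
    Int × String × String :=
  if e.2.2.1 = g then (if st.1 < e.2.2.2 then (e.2.2.2, e.2.1, e.1) else st) else st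

-- the hits of gene g, as B's grouping pass stores them
def pvHits (l : List (String × String × String × Int)) (g : String) :
    List (Int × String × String) :=
  (l.filter (fun e => e.2.2.1 == g)).map (fun e => (e.2.2.2, e.2.1, e.1))

-- nested fold over the dict-of-dicts = fold over the flattened entries
theorem pv_foldl_flatten {σ : Type} (F : σ → String → (String × String × Int) → σ)
    (d : List (String × List (String × String × Int))) (init : σ) :
    d.foldl (fun acc p => p.2.foldl (fun acc2 t => F acc2 p.1 t) acc) init
      = (pvEntries d).foldl (fun acc e => F acc e.1 e.2) init := by
  induction d generalizing init with
  | nil => simp [pvEntries]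
  | cons p d ih => simp [pvEntries, List.foldl_append, List.foldl_map] at *; rw [ih]

theorem pvA_genes_eq (d : List (String × List (String × String × Int))) :
    pvA_genes d = PySem.Set.ofList ((pvEntries d).map (·.2.2.1)) := by
  unfold pvA_genes
  rw [pv_foldl_flatten (fun acc _ t => if acc.contains t.2.1 then acc else acc ++ [t.2.1]) d []]
  show (pvEntries d).foldl (fun s e => PySem.Set.add s e.2.2.1) [] = _
  rw [← PySem.Set.update_map_eq_foldl_add]
  rfl

theorem pvA_scan_eq (d : List (String × List (String × String × Int))) (g : String)
    (st : Int × String × String) :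
    pvA_scan d g st = (pvEntries d).foldl (pvStepA g) st := by
  unfold pvA_scan
  rw [pv_foldl_flatten (fun st2 sn t =>
    if t.2.1 = g then (if st2.1 < t.2.2 then (t.2.2, t.1, sn) else st2) else st2) d st]
  rfl

-- A's scan over all entries = the same scan over just gene g's hits (the others are skipped)
theorem pvScan_hits (g : String) :
    ∀ (l : List (String × String × String × Int)) (st : Int × String × String),
    l.foldl (pvStepA g) st
      = (pvHits l g).foldl
          (fun (s : Int × String × String) t => if s.1 < t.1 then (t.1, t.2.1, t.2.2) else s)
          st := by
  intro l
  induction l with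
  | nil => intro st; rfl
  | cons e l ih =>
    intro st
    by_cases hb : e.2.2.1 = g
    · have hh : pvHits (e :: l) g = (e.2.2.2, e.2.1, e.1) :: pvHits l g := by
        simp [pvHits, hb]
      rw [hh]
      simp only [List.foldl_cons]
      rw [ih]
      by_cases hs : st.1 < e.2.2.2 <;> simp [pvStepA, hb, hs]
    · have hh : pvHits (e :: l) g = pvHits l g := by simp [pvHits, hb]
      rw [hh]
      simp only [List.foldl_cons]
      have : pvStepA g st e = st := by simp [pvStepA, hb]
      rw [this, ih]

-- B's grouping pass as a fold over the flattened entries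
def pvStepG (acc : PySem.Dict String (List (Int × String × String)))
    (e : String × String × String × Int) :
    PySem.Dict String (List (Int × String × String)) :=
  acc.modify e.2.2.1 [] (· ++ [(e.2.2.2, e.2.1, e.1)])

theorem pvB_group_eq (d : List (String × List (String × String × Int))) :
    pvB_group d = (pvEntries d).foldl pvStepG PySem.Dict.empty := by
  unfold pvB_group
  exact pv_foldl_flatten (fun acc2 sn t => acc2.modify t.2.1 [] (· ++ [(t.2.2, t.1, sn)]))
    d PySem.Dict.empty

theorem pvGroup_keys (l : List (String × String × String × Int)) :
    (l.foldl pvStepG PySem.Dict.empty).keys = PySem.Set.ofList (l.map (·.2.2.1)) := by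
  have aux : ∀ (l : List (String × String × String × Int))
      (d : PySem.Dict String (List (Int × String × String))),
      (l.foldl pvStepG d).keys = l.foldl (fun s e => PySem.Set.add s e.2.2.1) d.keys := by
    intro l
    induction l with
    | nil => intro d; rfl
    | cons e l ih =>
      intro d
      simp only [List.foldl_cons]
      rw [ih]
      congr 1
      rw [PySem.Set.add_eq_ite]
      unfold pvStepG
      rw [PySem.Dict.keys_modify]
      by_cases hm : e.2.2.1 ∈ d.keys
      · rw [if_pos hm]
        have hc : d.contains e.2.2.1 = true := (PySem.Dict.contains_iff_mem_keys d _).2 hm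
        rw [PySem.Dict.keys_insert_of_contains d _ hc]
      · rw [if_neg hm]
        have hc : d.contains e.2.2.1 = false := by
          rw [PySem.Dict.contains_eq_decide_mem_keys]; simp [hm]
        rw [PySem.Dict.keys_insert_of_not_contains d _ hc]
  rw [aux l PySem.Dict.empty]
  show l.foldl (fun s e => PySem.Set.add s e.2.2.1) [] = _
  rw [← PySem.Set.update_map_eq_foldl_add]
  rfl

theorem pvGroup_getD (l : List (String × String × String × Int)) (g : String) :
    (l.foldl pvStepG PySem.Dict.empty).getD g [] = pvHits l g := by
  have hfold : l.foldl pvStepG PySem.Dict.empty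
      = (l.map (fun e => (e.2.2.1, (e.2.2.2, e.2.1, e.1)))).foldl
          (fun d p => d.modify p.1 [] (· ++ [p.2])) PySem.Dict.empty := by
    rw [List.foldl_map]; rfl
  rw [hfold, PySem.Dict.getD_foldl_modify_append]
  simp only [PySem.Dict.getD_empty, List.nil_append]
  unfold pvHits
  rw [List.filter_map]
  simp [List.map_map, Function.comp_def]

-- items of the grouped dict: the distinct genes in first-appearance order, each with its hit list
theorem pvGroup_items (l : List (String × String × String × Int)) :
    (l.foldl pvStepG PySem.Dict.empty).items
      = (PySem.Set.ofList (l.map (·.2.2.1))).map (fun g => (g, pvHits l g)) := by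
  have hnd : (l.foldl pvStepG PySem.Dict.empty).keys.Nodup := by
    rw [pvGroup_keys]; exact PySem.Set.nodup_ofList _
  rw [PySem.Dict.items_eq_map_keys _ hnd [], pvGroup_keys]
  exact List.map_congr_left (fun g _ => by rw [pvGroup_getD])

-- ===== VERDICT (by name: the statement is the Claim_ definition above) =====
theorem get_best_bacterial_T3SS_match_dict_spec : Claim_equal_get_best_bacterial_T3SS_match_dict := by
  intro d _ _
  unfold Spec_get_best_bacterial_T3SS_match_dict
  unfold get_best_bacterial_T3SS_match_dict get_best_bacterial_T3SS_match_dict_alt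
  rw [pvB_group_eq, pvGroup_items, ← pvA_genes_eq, List.foldl_map]
  simp only [pvA_scan_eq, pvScan_hits]
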